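-- pv_equiv track=rewrite | github.com/LoucasMaillet/school | college/python/4 - csv graph/tp_ex2.py | pop_tranche_age
-- ===== SOURCE A (Python) =====
-- def pop_tranche_age(data: list) -> dict:
--     """
--
--     Description
--     -----------
--     Sort data into a dictionary of [(year, population), ... ] for age range.
--
--     Parameters
--     ----------
--     data : LIST
--         The database you want to sort.
--
--     Returns
--     -------
--     res : DICTIONARY
--         The database sorted.
--
--     """
--     res = {}
--     for year, age, pop in data:
--         if age in res:
--             res[age].append((year, pop))
--         else:
--             res[age] = [(year, pop)]
--     return res
-- ===== SOURCE B (Python) =====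
-- def pop_tranche_age(data: list) -> dict:
--     """Two-pass grouping: ordered-dedup the ages, then gather each age's
--     (year, pop) pairs with a filtering comprehension."""
--     ages = dict.fromkeys(age for _, age, _ in data)
--     return {age: [(year, pop) for year, a, pop in data if a == age]
--             for age in ages}
-- ===== Notes on version B (the rewrite author's own statement) =====
-- stated objective: alternative
-- what changed: A builds the dict in one pass, appending to per-age lists; B first order-dedups the ages (dict.fromkeys) and then builds each age's list by filtering the data once per distinct age.
import Mathlib
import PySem

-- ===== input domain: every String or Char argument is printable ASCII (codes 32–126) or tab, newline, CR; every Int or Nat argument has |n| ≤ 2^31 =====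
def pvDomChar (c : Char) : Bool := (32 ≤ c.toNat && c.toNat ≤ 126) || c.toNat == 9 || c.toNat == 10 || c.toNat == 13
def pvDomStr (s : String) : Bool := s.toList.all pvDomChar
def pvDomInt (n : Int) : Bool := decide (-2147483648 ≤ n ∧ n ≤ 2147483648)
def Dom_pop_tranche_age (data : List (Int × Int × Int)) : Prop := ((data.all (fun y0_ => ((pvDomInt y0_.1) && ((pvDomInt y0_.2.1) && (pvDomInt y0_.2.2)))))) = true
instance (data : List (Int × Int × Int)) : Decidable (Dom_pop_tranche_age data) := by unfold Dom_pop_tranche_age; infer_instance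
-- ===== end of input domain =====

-- B replaces A's single-pass dict-append loop by an ordered dedup of the ages followed by one filter per distinct age (alternative decomposition).


-- ===== PORT A =====
-- res = {}; for year, age, pop in data: if age in res: res[age].append((year,pop)) else: res[age] = [(year,pop)]; return res
def pop_tranche_age (data : List (Int × Int × Int)) : List (Int × List (Int × Int)) :=
  (data.foldl
    (fun res r =>
      if res.contains r.2.1 then
        res.modify r.2.1 [] (fun l => l ++ [(r.1, r.2.2)])
      else
        res.insert r.2.1 [(r.1, r.2.2)])
    (PySem.Dict.empty : PySem.Dict Int (List (Int × Int)))).items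

-- ===== PORT B =====
-- ages = dict.fromkeys(age for _, age, _ in data); {age: [(y,p) for y,a,p in data if a == age] for age in ages}
def pop_tranche_age_alt (data : List (Int × Int × Int)) : List (Int × List (Int × Int)) :=
  let ages := PySem.List.dedup (data.map (fun r => r.2.1))
  ages.map (fun age =>
    (age, (data.filter (fun r => r.2.1 == age)).map (fun r => (r.1, r.2.2))))

-- ===== PRECONDITION & SPEC =====
def Spec_pop_tranche_age (data : List (Int × Int × Int)) (out : List (Int × List (Int × Int))) : Prop := out = pop_tranche_age_alt data
instance (data : List (Int × Int × Int)) (out : List (Int × List (Int × Int))) : Decidable (Spec_pop_tranche_age data out) := by unfold Spec_pop_tranche_age; infer_instance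

-- ===== CLAIM (what is proved, stated in full; the proofs are below) =====
def Claim_equal_pop_tranche_age : Prop := ∀ (data : List (Int × Int × Int)), Dom_pop_tranche_age data → Spec_pop_tranche_age data (pop_tranche_age data)

-- ===== LEMMAS AND PROOFS =====

-- A's if/else step is exactly Python's d.modify (d[k] = d.get(k, []) ++ [v]).
theorem pta_step_eq_modify (res : PySem.Dict Int (List (Int × Int))) (r : Int × Int × Int) :
    (if res.contains r.2.1 then
        res.modify r.2.1 [] (fun l => l ++ [(r.1, r.2.2)])
      else
        res.insert r.2.1 [(r.1, r.2.2)])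
    = res.modify r.2.1 [] (fun l => l ++ [(r.1, r.2.2)]) := by
  by_cases h : res.contains r.2.1
  · simp [h]
  · simp only [Bool.not_eq_true] at h
    rw [h, if_neg (by simp)]
    unfold PySem.Dict.modify
    rw [PySem.Dict.getD_of_not_contains _ _ h]
    rfl

-- A's fold, rewritten as a modify-loop over (key, value) pairs.
theorem pta_fold_eq (data : List (Int × Int × Int)) :
    (data.foldl
      (fun res r =>
        if res.contains r.2.1 then
          res.modify r.2.1 [] (fun l => l ++ [(r.1, r.2.2)])
        else
          res.insert r.2.1 [(r.1, r.2.2)])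
      (PySem.Dict.empty : PySem.Dict Int (List (Int × Int))))
    = ((data.map (fun r => (r.2.1, (r.1, r.2.2)))).foldl
        (fun d p => d.modify p.1 [] (fun l => l ++ [p.2]))
        (PySem.Dict.empty : PySem.Dict Int (List (Int × Int)))) := by
  rw [List.foldl_map]
  exact PySem.List.foldl_congr_mem _ _ _ _ (fun d r _ => pta_step_eq_modify d r)

theorem pop_tranche_age_eq_alt (data : List (Int × Int × Int)) :
    pop_tranche_age data = pop_tranche_age_alt data := by
  unfold pop_tranche_age pop_tranche_age_alt
  rw [pta_fold_eq]
  set l := data.map (fun r => (r.2.1, (r.1, r.2.2))) with hl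
  have hnd : ((l.foldl (fun d p => d.modify p.1 [] (fun v => v ++ [p.2]))
      (PySem.Dict.empty : PySem.Dict Int (List (Int × Int))))).keys.Nodup := by
    exact PySem.Dict.nodup_keys_foldl_modify_key l (fun p => p.1) []
      (fun _ p v => v ++ [p.2]) _ (by simp [PySem.Dict.keys_empty])
  rw [PySem.Dict.items_eq_map_keys _ hnd []]
  have hkeys : ((l.foldl (fun d p => d.modify p.1 [] (fun v => v ++ [p.2]))
      (PySem.Dict.empty : PySem.Dict Int (List (Int × Int))))).keys
      = PySem.List.dedup (data.map (fun r => r.2.1)) := by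
    rw [PySem.Dict.keys_foldl_modify_key l (fun p => p.1) [] (fun _ p v => v ++ [p.2])]
    simp [hl, PySem.Dict.keys_empty, PySem.List.dedup, List.map_map,
      PySem.Set.update_nil_left, Function.comp_def]
  rw [hkeys]
  refine List.map_congr_left (fun age _ => ?_)
  rw [PySem.Dict.getD_foldl_modify_append l _ age]
  simp [hl, List.filter_map, List.map_map, Function.comp_def]

-- ===== VERDICT (by name: the statement is the Claim_ definition above) =====
theorem pop_tranche_age_spec : Claim_equal_pop_tranche_age := by
  intro data _
  exact pop_tranche_age_eq_alt data
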